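-- pv_equiv track=rewrite | github.com/YarinBS/IntroToAI_Proj1 | ex1.py | detect_multiple_delivers
-- ===== SOURCE A (Python) =====
-- def detect_multiple_delivers(actions):
--     """This function takes a list of actions in the form of [(), (), (), ...]
--     and checks if there are 2 'deliver' actions for 2 different drones on the same package.
--     If so, it removes this action"""
--     remove_list = []
--     for i in range(len(actions)):
--         picked_up_packages = set()
--         for subaction in actions[i]:
--             if subaction[0] == 'deliver':
--                 if subaction[2] not in picked_up_packages:  # .keys():  # Should be O(n)
--                     # if not picked_up_packages.get(subaction[3]):  #Should be O(1): https://www.quora.com/What-is-the-time-complexity-of-checking-if-a-key-is-in-a-dictionary-in-Python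
--                     #     picked_up_packages[subaction[3]] = 1
--                     picked_up_packages.add(subaction[3])
--                 else:
--                     remove_list.append(actions[i])
--                     break
--     # return list(set(actions) - set(remove_list))
--     return [item for item in actions if item not in remove_list]  # Check if this works properly!
-- ===== SOURCE B (Python) =====
-- def detect_multiple_delivers(actions):
--     """Keep only action-lists without a 'deliver' pair where an earlier deliver's
--     subaction[3] equals a later deliver's subaction[2] (pairwise check, no seen-set)."""
--     def has_dup(ds):
--         while ds:
--             d, ds = ds[0], ds[1:]
--             if any(e[2] == d[3] for e in ds):
--                 return True
--         return False
--     return [a for a in actions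
--             if not has_dup([s for s in a if s[0] == 'deliver'])]
-- ===== Notes on version B (the rewrite author's own statement) =====
-- stated objective: alternative
-- what changed: Replaces A's stateful seen-set scan plus build-remove_list-then-rescan by a single filtering pass that first extracts each action's 'deliver' subactions and then does a stateless pairwise check (earlier deliver's subaction[3] vs later deliver's subaction[2]); correct because A's scan breaks exactly when such an earlier/later pair exists.
import Mathlib
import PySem

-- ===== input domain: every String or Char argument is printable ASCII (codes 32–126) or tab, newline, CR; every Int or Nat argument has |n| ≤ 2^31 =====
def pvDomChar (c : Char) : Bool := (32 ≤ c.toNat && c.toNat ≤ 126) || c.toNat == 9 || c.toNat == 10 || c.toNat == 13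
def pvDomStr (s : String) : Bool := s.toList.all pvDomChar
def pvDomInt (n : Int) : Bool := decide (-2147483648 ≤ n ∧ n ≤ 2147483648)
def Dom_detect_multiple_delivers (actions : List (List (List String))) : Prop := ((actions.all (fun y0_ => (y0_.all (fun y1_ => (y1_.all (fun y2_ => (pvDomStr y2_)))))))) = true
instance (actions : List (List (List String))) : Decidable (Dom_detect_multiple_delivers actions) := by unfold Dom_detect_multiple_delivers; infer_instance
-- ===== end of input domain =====

-- B replaces A's stateful seen-set scan and build-remove_list-then-rescan by one filtering
-- pass with a stateless pairwise check on each action's extracted delivers (objective: alternative).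

-- ===== PORT A =====
-- A's inner loop over one action's subactions: returns true iff it appended (found a
-- duplicate delivery and broke).  Indexing via pyGetD is exact under Pre_ (indices in range).
def pvDupScanA : List (List String) → PySem.Set String → Bool
  | [], _ => false
  | sub :: rest, picked =>
    if PySem.List.pyGetD sub 0 "" = "deliver" then
      if !(PySem.Set.contains picked (PySem.List.pyGetD sub 2 "")) then
        pvDupScanA rest (PySem.Set.add picked (PySem.List.pyGetD sub 3 ""))
      else true   -- remove_list.append(actions[i]); break
    else pvDupScanA rest picked

def detect_multiple_delivers (actions : List (List (List String))) : List (List (List String)) :=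
  let remove_list := (PySem.List.pyRange 0 actions.length 1).foldl
    (fun rl i =>
      if pvDupScanA (PySem.List.pyGetD actions i []) PySem.Set.empty then
        rl ++ [PySem.List.pyGetD actions i []]
      else rl) []
  actions.filter (fun item => !(remove_list.contains item))

-- ===== PORT B =====
-- Source B's has_dup: peel the first deliver, compare its [3] against every later deliver's [2].
def pvHasDup : List (List String) → Bool
  | [] => false
  | d :: ds =>
    ds.any (fun e => PySem.List.pyGetD e 2 "" == PySem.List.pyGetD d 3 "") || pvHasDup ds

def detect_multiple_delivers_alt (actions : List (List (List String))) : List (List (List String)) :=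
  actions.filter (fun a =>
    !(pvHasDup (a.filter (fun s => PySem.List.pyGetD s 0 "" == "deliver"))))

-- ===== PRECONDITION & SPEC =====
-- A raises IndexError on an empty subaction (sub[0]) and on a 'deliver' subaction shorter
-- than 4 (sub[2]/sub[3]); Pre_ excludes those.  This is slightly narrower than A's exact
-- returning set: a malformed subaction sitting AFTER the break point of its action-list is
-- never touched by A, but B's comprehension/pair check does touch it and raises (see cites).
def Pre_detect_multiple_delivers (actions : List (List (List String))) : Prop :=
  ∀ act ∈ actions, ∀ sub ∈ act,
    sub ≠ [] ∧ (sub.headD "" = "deliver" → 4 ≤ sub.length)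
instance (actions : List (List (List String))) : Decidable (Pre_detect_multiple_delivers actions) := by
  unfold Pre_detect_multiple_delivers; infer_instance

def pvWitness_detect_multiple_delivers : List (List (List String)) :=
  [[["deliver", "d1", "p1", "p1"], ["move", "x"]], [["deliver", "d2", "p1", "p1"]]]

def Spec_detect_multiple_delivers (actions : List (List (List String))) (out : List (List (List String))) : Prop := out = detect_multiple_delivers_alt actions
instance (actions : List (List (List String))) (out : List (List (List String))) : Decidable (Spec_detect_multiple_delivers actions out) := by unfold Spec_detect_multiple_delivers; infer_instance

-- ===== CLAIM (what is proved, stated in full; the proofs are below) =====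
def Claim_equal_detect_multiple_delivers : Prop := ∀ (actions : List (List (List String))), Dom_detect_multiple_delivers actions → Pre_detect_multiple_delivers actions → Spec_detect_multiple_delivers actions (detect_multiple_delivers actions)

-- ===== LEMMAS AND PROOFS =====

-- Proof-only bridge: A's scan restricted to the delivers, carrying the seen-set.
def pvBadFrom : PySem.Set String → List (List String) → Bool
  | _, [] => false
  | s, d :: ds =>
    PySem.Set.contains s (PySem.List.pyGetD d 2 "") ||
      pvBadFrom (PySem.Set.add s (PySem.List.pyGetD d 3 "")) ds

-- A's scan equals pvBadFrom on the filtered delivers.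
theorem pvDupScanA_eq_badFrom (subs : List (List String)) (s : PySem.Set String) :
    pvDupScanA subs s
      = pvBadFrom s (subs.filter (fun x => PySem.List.pyGetD x 0 "" == "deliver")) := by
  induction subs generalizing s with
  | nil => simp [pvDupScanA, pvBadFrom]
  | cons sub rest ih =>
    simp only [pvDupScanA, List.filter_cons]
    by_cases h : PySem.List.pyGetD sub 0 "" = "deliver"
    · simp only [h, beq_self_eq_true, if_pos]
      simp [pvBadFrom, ih]
    · simp [h, ih]

-- Unfolding the seen-set: pvBadFrom s ds holds iff some deliver's [2] is in s, or a pair exists.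
theorem pvBadFrom_eq (ds : List (List String)) (s : PySem.Set String) :
    pvBadFrom s ds
      = (ds.any (fun e => PySem.Set.contains s (PySem.List.pyGetD e 2 "")) || pvHasDup ds) := by
  induction ds generalizing s with
  | nil => simp [pvBadFrom, pvHasDup]
  | cons d rest ih =>
    rw [Bool.eq_iff_iff]
    simp only [pvBadFrom, ih, pvHasDup, List.any_cons, Bool.or_eq_true, List.any_eq_true,
      PySem.Set.contains_iff, PySem.Set.mem_add, beq_iff_eq]
    constructor
    · rintro (h | (⟨x, hx, hq | hr⟩ | hH))
      · exact Or.inl (Or.inl h)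
      · exact Or.inl (Or.inr ⟨x, hx, hq⟩)
      · exact Or.inr (Or.inl ⟨x, hx, hr⟩)
      · exact Or.inr (Or.inr hH)
    · rintro ((h | ⟨x, hx, hq⟩) | (⟨x, hx, hr⟩ | hH))
      · exact Or.inl h
      · exact Or.inr (Or.inl ⟨x, hx, Or.inl hq⟩)
      · exact Or.inr (Or.inl ⟨x, hx, Or.inr hr⟩)
      · exact Or.inr (Or.inr hH)

-- A's remove_list is exactly the bad actions, in order.
theorem pvRemoveList_eq_filter (actions : List (List (List String))) :
    (PySem.List.pyRange 0 actions.length 1).foldl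
      (fun rl i =>
        if pvDupScanA (PySem.List.pyGetD actions i []) PySem.Set.empty then
          rl ++ [PySem.List.pyGetD actions i []]
        else rl) []
    = actions.filter (fun a => pvDupScanA a PySem.Set.empty) := by
  have h := PySem.List.foldl_pyRange_pyGetD (xs := actions) (d := [])
    (f := fun rl act => if pvDupScanA act PySem.Set.empty then rl ++ [act] else rl)
    (init := ([] : List (List (List String)))) (a := 0) (by norm_num)
  simp only [Int.toNat_zero, List.drop_zero, PySem.List.len] at h
  rw [h, PySem.List.foldl_append_if_eq_filter]
  simp

theorem detect_multiple_delivers_spec : Claim_equal_detect_multiple_delivers := by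
  intro actions _ _
  unfold Spec_detect_multiple_delivers detect_multiple_delivers detect_multiple_delivers_alt
  rw [pvRemoveList_eq_filter]
  apply List.filter_congr
  intro x hx
  have hkey := pvDupScanA_eq_badFrom x PySem.Set.empty
  rw [pvBadFrom_eq] at hkey
  simp only [PySem.Set.empty] at hkey
  simp [List.mem_filter, hx, hkey]
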